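-- pv_equiv track=rewrite | github.com/bio-info-guy/smartseq2_bash_qc_scripts | sampleQC.py | CIGAR
-- ===== SOURCE A (Python) =====
-- def CIGAR(start, cigar):
--     cigar_lis = list(cigar)
--     ref = []
--     ss = int(start)
--     num = ""
--     for char in cigar_lis:
--         if char.isdigit():
--             num = num+char
--         else:
--             if char in "SM":
--                 ref.append((ss, ss+int(num)-1))
--                 ss = ss+int(num)
--             elif char in "ND":
--                 ss = ss+int(num)
--             num = ""
--     return ref
-- ===== SOURCE B (Python) =====
-- def _tokenize(cigar):
--     # split into (count, op) tokens: a maximal run of digits followed by one non-digit char;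
--     # trailing digits with no following op are dropped
--     toks = []
--     i, n = 0, len(cigar)
--     while i < n:
--         j = i
--         while j < n and '0' <= cigar[j] <= '9':
--             j += 1
--         if j == n:
--             break
--         toks.append((cigar[i:j], cigar[j]))
--         i = j + 1
--     return toks
--
-- def CIGAR(start, cigar):
--     ref = []
--     ss = int(start)
--     for num, op in _tokenize(cigar):
--         if op in 'SM':
--             ref.append((ss, ss + int(num) - 1))
--             ss += int(num)
--         elif op in 'ND':
--             ss += int(num)
--     return ref
-- ===== Notes on version B (the rewrite author's own statement) =====
-- stated objective: idiomatic
-- what changed: A scans characters one by one while interleaving a mutable digit accumulator with the op-handling branches; B first tokenizes the CIGAR string into a list of (count, op) pairs and then folds over that token list, separating parsing from interval construction.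
import Mathlib
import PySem

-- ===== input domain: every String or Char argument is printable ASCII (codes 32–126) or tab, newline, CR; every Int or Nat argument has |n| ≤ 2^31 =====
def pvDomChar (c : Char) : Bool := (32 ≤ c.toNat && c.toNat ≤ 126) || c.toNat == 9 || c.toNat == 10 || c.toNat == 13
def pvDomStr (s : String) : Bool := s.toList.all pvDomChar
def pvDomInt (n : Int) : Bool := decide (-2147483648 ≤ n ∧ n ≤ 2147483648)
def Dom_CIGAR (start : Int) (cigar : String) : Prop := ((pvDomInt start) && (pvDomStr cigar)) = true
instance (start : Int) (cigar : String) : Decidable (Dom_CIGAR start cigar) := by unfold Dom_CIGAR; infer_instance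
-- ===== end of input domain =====

-- B replaces A's interleaved char-scan-with-digit-accumulator by a tokenize-then-fold
-- decomposition: first split the CIGAR string into (count, op) tokens, then fold over them.


-- ===== PORT A =====
-- A's loop over the characters: state (ref, ss, num); num is the accumulated digit run.
-- int(num) is ported as (PySem.Int.ofChars? num).getD 0; the empty-num case, where Python
-- raises ValueError, is excluded by Pre_CIGAR. char.isdigit() is ported as
-- PySem.Chars.isdigit (exact on the ASCII domain).
def CIGARloop : List Char → List (Int × Int) → Int → List Char → List (Int × Int)
  | [], ref, _, _ => ref
  | c :: t, ref, ss, num =>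
    if PySem.Chars.isdigit c then
      CIGARloop t ref ss (num ++ [c])
    else if c == 'S' || c == 'M' then
      CIGARloop t (ref ++ [(ss, ss + (PySem.Int.ofChars? num).getD 0 - 1)])
        (ss + (PySem.Int.ofChars? num).getD 0) []
    else if c == 'N' || c == 'D' then
      CIGARloop t ref (ss + (PySem.Int.ofChars? num).getD 0) []
    else
      CIGARloop t ref ss []

def CIGAR (start : Int) (cigar : String) : List (Int × Int) :=
  CIGARloop cigar.toList [] start []

-- ===== PORT B =====
-- Source B's inner `while j < n and '0' <= cigar[j] <= '9'` loop: split off the leading digit run.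
-- ('0' <= c <= '9' compares code points in Python; Char ≤ is code-point order, exact for all chars.)
def spanDigits : List Char → List Char × List Char
  | [] => ([], [])
  | c :: t =>
    if ('0' ≤ c && c ≤ '9') then (c :: (spanDigits t).1, (spanDigits t).2)
    else ([], c :: t)

-- needed by tokenize's termination proof
theorem spanDigits_snd_length_le (l : List Char) : (spanDigits l).2.length ≤ l.length := by
  induction l with
  | nil => simp [spanDigits]
  | cons c t ih =>
    simp only [spanDigits]
    split
    · exact Nat.le_succ_of_le ih
    · simp

-- Source B's outer while loop: emit one (count, op) token per step; trailing digits are dropped.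
def tokenize (l : List Char) : List (List Char × Char) :=
  match _h : spanDigits l with
  | (_, []) => []
  | (num, op :: rest) => (num, op) :: tokenize rest
termination_by l.length
decreasing_by
  have hle := spanDigits_snd_length_le l
  rw [_h] at hle
  simp at hle
  omega

-- Source B's for-loop over the tokens, state (ref, ss).
def foldB : List (List Char × Char) → List (Int × Int) → Int → List (Int × Int)
  | [], ref, _ => ref
  | (num, op) :: rest, ref, ss =>
    if op == 'S' || op == 'M' then
      foldB rest (ref ++ [(ss, ss + (PySem.Int.ofChars? num).getD 0 - 1)])
        (ss + (PySem.Int.ofChars? num).getD 0)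
    else if op == 'N' || op == 'D' then
      foldB rest ref (ss + (PySem.Int.ofChars? num).getD 0)
    else
      foldB rest ref ss

def CIGAR_alt (start : Int) (cigar : String) : List (Int × Int) :=
  foldB (tokenize cigar.toList) [] start

-- ===== PRECONDITION & SPEC =====
-- Pre_ excludes exactly the inputs where Python A raises ValueError (int("") on an
-- S/M/N/D op with no digits directly before it); B's Python raises there too.
def Pre_CIGAR (start : Int) (cigar : String) : Prop :=
  ((cigar.toList.take 1).all (fun c => !(c == 'S' || c == 'M' || c == 'N' || c == 'D'))
    && (cigar.toList.zip (cigar.toList.drop 1)).all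
        (fun p => !(p.2 == 'S' || p.2 == 'M' || p.2 == 'N' || p.2 == 'D')
                  || PySem.Chars.isdigit p.1)) = true
instance (start : Int) (cigar : String) : Decidable (Pre_CIGAR start cigar) := by
  unfold Pre_CIGAR; infer_instance

def pvWitness_CIGAR : Int × String := (3, "5S10M2N1D7I4M")

def Spec_CIGAR (start : Int) (cigar : String) (out : List (Int × Int)) : Prop := out = CIGAR_alt start cigar
instance (start : Int) (cigar : String) (out : List (Int × Int)) : Decidable (Spec_CIGAR start cigar out) := by unfold Spec_CIGAR; infer_instance

-- ===== CLAIM (what is proved, stated in full; the proofs are below) =====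
def Claim_equal_CIGAR : Prop := ∀ (start : Int) (cigar : String), Dom_CIGAR start cigar → Pre_CIGAR start cigar → Spec_CIGAR start cigar (CIGAR start cigar)

-- ===== LEMMAS AND PROOFS =====

-- A's digit test and B's digit test agree on every character.
theorem isdigit_eq_range (c : Char) : PySem.Chars.isdigit c = ('0' ≤ c && c ≤ '9') := by
  simp [PySem.Chars.isdigit, Char.le_def]

theorem spanDigits_append (num l : List Char)
    (h : ∀ c ∈ num, ('0' ≤ c && c ≤ '9') = true) :
    spanDigits (num ++ l) = (num ++ (spanDigits l).1, (spanDigits l).2) := by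
  induction num with
  | nil => simp
  | cons c t ih =>
    have hc := h c (by simp)
    simp only [List.cons_append, spanDigits, hc, if_pos]
    rw [ih (fun x hx => h x (by simp [hx]))]

theorem tokenize_of_span_cons (l num : List Char) (op : Char) (rest : List Char)
    (hsp : spanDigits l = (num, op :: rest)) :
    tokenize l = (num, op) :: tokenize rest := by
  rw [tokenize]
  split
  · rename_i h; rw [hsp] at h; simp at h
  · rename_i num' op' rest' h
    rw [hsp] at h
    injection h with h1 h2
    injection h2 with h3 h4
    subst h1; subst h3; subst h4; rfl

theorem tokenize_of_span_nil (l : List Char) (num : List Char)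
    (hsp : spanDigits l = (num, [])) :
    tokenize l = [] := by
  rw [tokenize]
  split
  · rfl
  · rename_i num' op' rest' h; rw [hsp] at h; simp at h

theorem tokenize_cons_op (num : List Char) (c : Char) (t : List Char)
    (hnum : ∀ x ∈ num, ('0' ≤ x && x ≤ '9') = true)
    (hc : ('0' ≤ c && c ≤ '9') = false) :
    tokenize (num ++ c :: t) = (num, c) :: tokenize t := by
  apply tokenize_of_span_cons
  rw [spanDigits_append num (c :: t) hnum]
  simp [spanDigits, hc]

theorem tokenize_digits (num : List Char)
    (hnum : ∀ x ∈ num, ('0' ≤ x && x ≤ '9') = true) :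
    tokenize num = [] := by
  apply tokenize_of_span_nil num num
  have := spanDigits_append num [] hnum
  simpa [spanDigits] using this

theorem main_loop (l : List Char) :
    ∀ (ref : List (Int × Int)) (ss : Int) (num : List Char),
    (∀ x ∈ num, ('0' ≤ x && x ≤ '9') = true) →
    CIGARloop l ref ss num = foldB (tokenize (num ++ l)) ref ss := by
  induction l with
  | nil =>
    intro ref ss num hnum
    simp only [List.append_nil, CIGARloop, tokenize_digits num hnum, foldB]
  | cons c t ih =>
    intro ref ss num hnum
    rcases hdig : ('0' ≤ c && c ≤ '9') with _ | _
    · -- c is not a digit: a token (num, c) is emitted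
      rw [tokenize_cons_op num c t hnum hdig]
      simp only [CIGARloop, isdigit_eq_range, hdig, Bool.false_eq_true, if_false, foldB]
      split
      · exact ih _ _ [] (by simp)
      · split
        · exact ih _ _ [] (by simp)
        · exact ih _ _ [] (by simp)
    · -- c is a digit: it joins the accumulator / the current token's count
      have hnum' : ∀ x ∈ num ++ [c], ('0' ≤ x && x ≤ '9') = true := by
        intro x hx
        rcases List.mem_append.mp hx with h | h
        · exact hnum x h
        · simp at h; subst h; exact hdig
      simp only [CIGARloop, isdigit_eq_range, hdig, if_true]
      rw [ih _ _ (num ++ [c]) hnum', List.append_assoc]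
      simp

-- ===== VERDICT (by name: the statement is the Claim_ definition above) =====
theorem CIGAR_spec : Claim_equal_CIGAR := by
  intro start cigar _ _
  unfold Spec_CIGAR CIGAR CIGAR_alt
  simpa using main_loop cigar.toList [] start [] (by simp)
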